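-- pv_equiv track=rewrite | github.com/Drew-Fisher/advent-2021 | day_3/main.py | calculateCO2
-- ===== SOURCE A (Python) =====
-- def getLeastCommonAtIndex(inputs,index):
--     zeros = [x for x in inputs if x[index] == "0"]
--     if len(zeros) <= len(inputs)/2:
--         return zeros
--     else:
--         return [x for x in inputs if x[index] == "1"]
--
-- def calculateCO2(inputs,index):
--     if len(inputs) > 0:
--         if index == len(inputs[0]):
--             return inputs[0]
--         inputsNew = getLeastCommonAtIndex(inputs, index)
--         index += 1
--         result = calculateCO2(inputsNew, index)
--         if not result:
--             return inputs[0]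
--         return result
--     else:
--         return
-- ===== SOURCE B (Python) =====
-- def calculateCO2(inputs, index):
--     # B: explicit while-loop with break (vs A's recursion with one-level
--     # None-backtracking); count zeros once, then a single filter per step.
--     if not inputs:
--         return None
--     current = inputs
--     while index != len(current[0]):
--         zeros = sum(1 for x in current if x[index] == "0")
--         target = "0" if zeros * 2 <= len(current) else "1"
--         nxt = [x for x in current if x[index] == target]
--         if not nxt:
--             break
--         current = nxt
--         index += 1
--     return current[0]
-- ===== Notes on version B (the rewrite author's own statement) =====
-- stated objective: simpler
-- what changed: Replaces A's recursion with one-level None-backtracking and a two-branch zeros/ones filter by an explicit while-loop that counts zeros once with a 0/1-sum, picks the target bit, filters once per step, and breaks to return current[0] when the filter empties.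
-- outside the precondition, e.g. on calculateCO2(['01', '1'], 0): A returns '01', B returns '01'
import Mathlib
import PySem

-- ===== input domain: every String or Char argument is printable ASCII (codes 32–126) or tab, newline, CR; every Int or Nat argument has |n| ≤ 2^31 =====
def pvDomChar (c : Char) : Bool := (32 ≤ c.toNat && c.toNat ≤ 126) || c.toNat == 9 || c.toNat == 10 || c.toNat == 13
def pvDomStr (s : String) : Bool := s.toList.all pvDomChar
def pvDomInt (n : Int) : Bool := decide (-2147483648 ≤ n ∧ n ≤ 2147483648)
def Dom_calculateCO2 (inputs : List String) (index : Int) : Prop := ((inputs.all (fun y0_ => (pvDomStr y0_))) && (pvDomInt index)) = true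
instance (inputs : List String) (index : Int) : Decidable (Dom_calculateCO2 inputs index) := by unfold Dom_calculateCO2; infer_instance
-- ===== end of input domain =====

-- B replaces A's one-level-backtracking recursion by an explicit while-loop with
-- break (ported as fuel recursion) that counts zeros with a 0/1-sum and filters once
-- per step (objective: simpler decomposition).


-- Termination measure for port A (cited by its decreasing_by).
def pvMaxLen (inputs : List String) : Nat :=
  inputs.foldr (fun s m => max s.toList.length m) 0

def pvMeasure (inputs : List String) (index : Int) : Nat :=
  (((pvMaxLen inputs : Int) + 1) - index).toNat * 2 + min inputs.length 1

theorem pvMaxLen_filter_le (p : String → Bool) (inputs : List String) :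
    pvMaxLen (inputs.filter p) ≤ pvMaxLen inputs := by
  induction inputs with
  | nil => simp [pvMaxLen]
  | cons h t ih =>
    by_cases hp : p h
    · rw [List.filter_cons_of_pos hp]
      exact max_le_max (le_refl _) ih
    · rw [List.filter_cons_of_neg hp]
      exact le_trans ih (le_max_right _ _)

theorem pvLen_le_maxLen {y : String} {inputs : List String} (hy : y ∈ inputs) :
    y.toList.length ≤ pvMaxLen inputs := by
  induction inputs with
  | nil => cases hy
  | cons z t ih =>
    have h2 : pvMaxLen (z :: t) = max z.toList.length (pvMaxLen t) := rfl
    rw [h2]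
    rcases List.mem_cons.mp hy with rfl | hy'
    · exact le_max_left _ _
    · exact le_trans (ih hy') (le_max_right _ _)

theorem pvMeasure_dec_filter (inputs : List String) (index : Int) (ch : Char)
    (hne : inputs ≠ []) :
    pvMeasure (inputs.filter (fun x => PySem.Str.pyGet? x index == some ch)) (index + 1)
      < pvMeasure inputs index := by
  set p : String → Bool := fun x => PySem.Str.pyGet? x index == some ch with hp
  have hM : pvMaxLen (inputs.filter p) ≤ pvMaxLen inputs := pvMaxLen_filter_le p inputs
  cases hf : inputs.filter p with
  | nil =>
    have hlen : 0 < inputs.length := List.length_pos_iff.mpr hne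
    have e : ((0:Nat):Int) + 1 - (index + 1) = -index := by push_cast; ring
    have h1 : pvMeasure [] (index + 1) = (-index).toNat * 2 := by
      rw [pvMeasure, show pvMaxLen ([] : List String) = 0 from rfl, e]
      rfl
    have hmin : min inputs.length 1 = 1 := Nat.min_eq_right hlen
    have hle : -index ≤ (pvMaxLen inputs : Int) + 1 - index := by
      have h0 : (0:Int) ≤ (pvMaxLen inputs : Int) + 1 := by positivity
      calc -index = 0 - index := (zero_sub index).symm
        _ ≤ (pvMaxLen inputs : Int) + 1 - index := sub_le_sub_right h0 index
    calc pvMeasure [] (index + 1) = (-index).toNat * 2 := h1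
      _ ≤ ((pvMaxLen inputs : Int) + 1 - index).toNat * 2 :=
          Nat.mul_le_mul_right 2 (Int.toNat_le_toNat hle)
      _ < ((pvMaxLen inputs : Int) + 1 - index).toNat * 2 + 1 := Nat.lt_succ_self _
      _ = pvMeasure inputs index := by rw [pvMeasure, hmin]
  | cons y ys =>
    have hy : y ∈ inputs.filter p := by rw [hf]; exact List.mem_cons_self
    have hyp : p y = true := List.of_mem_filter hy
    have hrange : PySem.Raise.InRange y.toList.length index := by
      by_contra hc
      have hnone : PySem.List.pyGet? y.toList index = none :=
        (PySem.List.pyGet?_eq_none_iff _ _).mpr hc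
      simp [hp, hnone] at hyp
    have hidx : index < (y.toList.length : Int) := hrange.2
    have hyM : y.toList.length ≤ pvMaxLen (inputs.filter p) := pvLen_le_maxLen hy
    have hlen : 0 < inputs.length := List.length_pos_iff.mpr hne
    rw [hf] at hM hyM
    have hidx' : index < (pvMaxLen (y :: ys) : Int) :=
      lt_of_lt_of_le hidx (Nat.cast_le.mpr hyM)
    have e : ((pvMaxLen (y :: ys) : Int) + 1) - (index + 1) = (pvMaxLen (y :: ys) : Int) - index := by
      ring
    have hlt : (pvMaxLen (y :: ys) : Int) - index < (pvMaxLen inputs : Int) + 1 - index :=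
      sub_lt_sub_right (lt_of_le_of_lt (Nat.cast_le.mpr hM) (lt_add_one _)) index
    have hpos : (0:Int) < (pvMaxLen inputs : Int) + 1 - index :=
      lt_trans (sub_pos.mpr hidx') hlt
    have ht : ((pvMaxLen (y :: ys) : Int) - index).toNat < ((pvMaxLen inputs : Int) + 1 - index).toNat := by
      exact (Int.toNat_lt_toNat hpos).mpr hlt
    have hmin1 : min (y :: ys).length 1 = 1 := Nat.min_eq_right (Nat.succ_le_succ (Nat.zero_le _))
    have hmin2 : min inputs.length 1 = 1 := Nat.min_eq_right hlen
    rw [pvMeasure, pvMeasure, hmin1, hmin2, e]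
    exact Nat.add_lt_add_right ((Nat.mul_lt_mul_right (by decide)).mpr ht) 1

-- ===== PORT A =====
def getLeastCommonAtIndex (inputs : List String) (index : Int) : List String :=
  let zeros := inputs.filter (fun x => PySem.Str.pyGet? x index == some '0')
  -- Python compares len(zeros) <= len(inputs)/2 with exact float halves: k ≤ n/2 ↔ 2k ≤ n.
  if (zeros.length : Int) * 2 ≤ (inputs.length : Int) then zeros
  else inputs.filter (fun x => PySem.Str.pyGet? x index == some '1')

-- A's two-branch least-common filter written as a single filter (used by decreasing_by).
theorem glci_eq (inputs : List String) (index : Int) :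
    getLeastCommonAtIndex inputs index =
      inputs.filter (fun x => PySem.Str.pyGet? x index ==
        some (if ((inputs.countP (fun x => PySem.Str.pyGet? x index == some '0')) : Int) * 2
                ≤ (inputs.length : Int) then '0' else '1')) := by
  have hc : ((inputs.filter (fun x => PySem.Str.pyGet? x index == some '0')).length : Int)
      = ((inputs.countP (fun x => PySem.Str.pyGet? x index == some '0')) : Int) := by
    simp [List.countP_eq_length_filter]
  by_cases h : ((inputs.countP (fun x => PySem.Str.pyGet? x index == some '0')) : Int) * 2
      ≤ (inputs.length : Int)
  · show (if ((inputs.filter (fun x => PySem.Str.pyGet? x index == some '0')).length : Int) * 2 ≤ (inputs.length : Int) then inputs.filter (fun x => PySem.Str.pyGet? x index == some '0') else inputs.filter (fun x => PySem.Str.pyGet? x index == some '1')) = _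
    rw [hc]; simp only [if_pos h]
  · show (if ((inputs.filter (fun x => PySem.Str.pyGet? x index == some '0')).length : Int) * 2 ≤ (inputs.length : Int) then inputs.filter (fun x => PySem.Str.pyGet? x index == some '0') else inputs.filter (fun x => PySem.Str.pyGet? x index == some '1')) = _
    rw [hc]; simp only [if_neg h]

def calculateCO2 (inputs : List String) (index : Int) : Option String :=
  match inputs with
  | [] => none
  | c :: cs =>
    if index = PySem.Str.len c then some c
    else
      let inputsNew := getLeastCommonAtIndex (c :: cs) index
      match calculateCO2 inputsNew (index + 1) with
      | none => some c                                 -- `if not result:` on None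
      | some s => if s = "" then some c else some s    -- `if not result:` on a string
termination_by pvMeasure inputs index
decreasing_by
  rw [glci_eq]
  exact pvMeasure_dec_filter _ index _ (List.cons_ne_nil _ _)

-- ===== PORT B =====
-- B's while-loop, as fuel recursion: one iteration per unit of fuel; the fuel
-- (length of current[0] minus index, plus one) bounds the loop inside Pre_ (guard only;
-- it is never reached there). `some c` covers both `break` and the loop-exit return.
def co2Go (fuel : Nat) (current : List String) (i : Int) : Option String :=
  match fuel, current with
  | 0, _ => none            -- fuel guard, unreachable inside Pre_
  | _ + 1, [] => none       -- current[0] on []; unreachable (loop invariant)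
  | fuel + 1, c :: cs =>
    if i = PySem.Str.len c then some c
    else
      let zeros : Int := ((c :: cs).map
        (fun x => if PySem.Str.pyGet? x i == some '0' then (1 : Int) else 0)).sum
      let target := if zeros * 2 ≤ ((c :: cs).length : Int) then '0' else '1'
      let nxt := (c :: cs).filter (fun x => PySem.Str.pyGet? x i == some target)
      if nxt = [] then some c
      else co2Go fuel nxt (i + 1)

def calculateCO2_alt (inputs : List String) (index : Int) : Option String :=
  match inputs with
  | [] => none
  | c :: cs => co2Go ((PySem.Str.len c - index).toNat + 1) (c :: cs) index

-- ===== PRECONDITION & SPEC =====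
-- Pre_ excludes ragged lists (strings of differing lengths, unless A returns inputs[0]
-- immediately because index = len(inputs[0])) and indices outside [-L, L]: there whether
-- A raises IndexError depends on the whole recursion and cannot be stated in closed form;
-- on some such ragged lists A still returns and B returns the same value.
def Pre_calculateCO2 (inputs : List String) (index : Int) : Prop :=
  match inputs with
  | [] => True
  | c :: cs =>
    index = (c.toList.length : Int) ∨
    ((∀ x ∈ c :: cs, x.toList.length = c.toList.length) ∧
      -(c.toList.length : Int) ≤ index ∧ index ≤ (c.toList.length : Int))

instance (inputs : List String) (index : Int) : Decidable (Pre_calculateCO2 inputs index) := by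
  unfold Pre_calculateCO2; cases inputs <;> infer_instance

def pvWitness_calculateCO2 : List String × Int := (["01", "10", "11"], 0)

def Spec_calculateCO2 (inputs : List String) (index : Int) (out : Option String) : Prop := out = calculateCO2_alt inputs index
instance (inputs : List String) (index : Int) (out : Option String) : Decidable (Spec_calculateCO2 inputs index out) := by unfold Spec_calculateCO2; infer_instance

-- ===== CLAIM (what is proved, stated in full; the proofs are below) =====
def Claim_equal_calculateCO2 : Prop := ∀ (inputs : List String) (index : Int), Dom_calculateCO2 inputs index → Pre_calculateCO2 inputs index → Spec_calculateCO2 inputs index (calculateCO2 inputs index)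

-- ===== LEMMAS AND PROOFS =====

-- Both step bodies pick the same target bit and the same filtered list.
theorem co2_main (L : Nat) :
    ∀ (fuel : Nat) (current : List String) (i : Int), current ≠ [] →
      (∀ x ∈ current, x.toList.length = L) →
      -(L : Int) ≤ i → i ≤ (L : Int) → ((L : Int) - i).toNat < fuel →
      ∃ s ∈ current, calculateCO2 current i = some s ∧ co2Go fuel current i = some s := by
  intro fuel
  induction fuel with
  | zero => intro current i _ _ _ _ hf; omega
  | succ n ih =>
    intro current i hne hlen hlo hhi hf
    obtain ⟨c, cs, rfl⟩ := List.exists_cons_of_ne_nil hne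
    have hcl : c.toList.length = L := hlen c List.mem_cons_self
    by_cases hidx : i = (L : Int)
    · have hif : i = PySem.Str.len c := by simp [PySem.Str.len_eq, hcl, hidx]
      refine ⟨c, List.mem_cons_self, ?_, ?_⟩
      · rw [calculateCO2.eq_def]; simp only [if_pos hif]
      · rw [co2Go.eq_def]; simp only [if_pos hif]
    · have hlt : i < (L : Int) := lt_of_le_of_ne hhi hidx
      have hif : ¬ i = PySem.Str.len c := by simp [PySem.Str.len_eq, hcl, hidx]
      set target : Char := if (((c :: cs).countP (fun x => PySem.Str.pyGet? x i == some '0')) : Int) * 2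
          ≤ ((c :: cs).length : Int) then '0' else '1' with htarget
      set nxt := (c :: cs).filter (fun x => PySem.Str.pyGet? x i == some target) with hnxt
      have hA : calculateCO2 (c :: cs) i =
          match calculateCO2 nxt (i + 1) with
          | none => some c
          | some s => if s = "" then some c else some s := by
        rw [calculateCO2.eq_def]
        simp only [if_neg hif, glci_eq]
        rw [← htarget, ← hnxt]
      have hB : co2Go (n + 1) (c :: cs) i =
          if nxt = [] then some c else co2Go n nxt (i + 1) := by
        rw [co2Go.eq_def]
        simp only [if_neg hif, PySem.List.sum_map_ite_one_zero]
        rw [← htarget, ← hnxt]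
      by_cases hempty : nxt = []
      · have hnil : calculateCO2 ([] : List String) (i + 1) = none := by
          rw [calculateCO2.eq_def]
        rw [hempty, hnil] at hA
        exact ⟨c, List.mem_cons_self, hA, by rw [hB, if_pos hempty]⟩
      · have hsub : ∀ x ∈ nxt, x.toList.length = L := fun x hx =>
          hlen x (List.mem_of_mem_filter hx)
        have hrangeIdx : ∀ x ∈ nxt, PySem.Raise.InRange x.toList.length i := by
          intro x hx
          have hxp := List.of_mem_filter hx
          by_contra hc2
          have hnone2 : PySem.List.pyGet? x.toList i = none :=
            (PySem.List.pyGet?_eq_none_iff _ _).mpr hc2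
          simp [hnone2] at hxp
        obtain ⟨y, ys, hy⟩ := List.exists_cons_of_ne_nil hempty
        have hymem : y ∈ nxt := by rw [hy]; exact List.mem_cons_self
        have hyR := hrangeIdx y hymem
        have hyL : y.toList.length = L := hsub y hymem
        have hLpos : 0 < L := by
          rcases hyR with ⟨h1, h2⟩
          rw [hyL] at h1 h2; omega
        obtain ⟨s, hsmem, haeq, hbeq⟩ :=
          ih nxt (i + 1) hempty hsub (by omega) (by omega) (by omega)
        have hsne : ¬ s = "" := by
          intro h
          have := hsub s hsmem
          rw [h] at this
          simp at this
          omega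
        refine ⟨s, List.mem_of_mem_filter (hnxt ▸ hsmem), ?_, ?_⟩
        · rw [hA, haeq]
          simp [hsne]
        · rw [hB, if_neg hempty]
          exact hbeq

-- ===== VERDICT (by name: the statement is the Claim_ definition above) =====
theorem calculateCO2_spec : Claim_equal_calculateCO2 := by
  intro inputs index _ hpre
  unfold Spec_calculateCO2
  match inputs with
  | [] => rw [calculateCO2.eq_def, calculateCO2_alt.eq_def]
  | c :: cs =>
    unfold Pre_calculateCO2 at hpre
    show calculateCO2 (c :: cs) index
        = co2Go ((PySem.Str.len c - index).toNat + 1) (c :: cs) index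
    rcases hpre with hidx | ⟨hlen, hlo, hhi⟩
    · have hif : index = PySem.Str.len c := by simp [PySem.Str.len_eq, hidx]
      have hf : (PySem.Str.len c - index).toNat = 0 := by rw [hif]; simp
      rw [hf, calculateCO2.eq_def, co2Go.eq_def]
      simp only [if_pos hif]
    · obtain ⟨s, _, haeq, hbeq⟩ := co2_main c.toList.length
        (((c.toList.length : Int) - index).toNat + 1) (c :: cs) index
        (by simp) hlen hlo hhi (by omega)
      rw [haeq, show PySem.Str.len c = (c.toList.length : Int) from PySem.Str.len_eq c, hbeq]
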